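-- pv_equiv track=rewrite | github.com/WoungSub-Byun/algorithm-codingtest | programmers/구명보트.py | solution
-- ===== SOURCE A (Python) =====
-- def solution(people, limit):
--     rescue = 0
--     people.sort()
--     r = len(people)
--     for i in range(r):
--         if people[0] + people[-1] <= limit:
--             del people[0]
--         people.pop()
--         rescue = 1
--         if len(people) < 2:
--             if len(people) == 0:
--                 break
--             rescue+=1
--             break
--     return rescue
-- ===== SOURCE B (Python) =====
-- def solution(people, limit):
--     a = sorted(people)
--     i, j = 0, len(a) - 1
--     while i < j:
--         if a[i] + a[j] <= limit:
--             i += 1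
--         j -= 1
--     if j < 0:
--         return 0
--     return 1 if i > j else 2
-- ===== Notes on version B (the rewrite author's own statement) =====
-- stated objective: faster
-- what changed: A simulates boat loading by repeatedly mutating the sorted list (del people[0] / pop), which costs O(n) per front deletion; B is a two-pointer scan over the sorted list that only moves two indices and classifies the result by the final remaining count.
-- intended difference: On one-element lists whose single person exceeds the limit even alone, A returns 1 as if nobody were left, while B returns 2 (one person still left), matching A's own treatment of a leftover person in longer lists. — e.g. on solution([7], 5): A returns 1, B returns 2
import Mathlib
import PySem

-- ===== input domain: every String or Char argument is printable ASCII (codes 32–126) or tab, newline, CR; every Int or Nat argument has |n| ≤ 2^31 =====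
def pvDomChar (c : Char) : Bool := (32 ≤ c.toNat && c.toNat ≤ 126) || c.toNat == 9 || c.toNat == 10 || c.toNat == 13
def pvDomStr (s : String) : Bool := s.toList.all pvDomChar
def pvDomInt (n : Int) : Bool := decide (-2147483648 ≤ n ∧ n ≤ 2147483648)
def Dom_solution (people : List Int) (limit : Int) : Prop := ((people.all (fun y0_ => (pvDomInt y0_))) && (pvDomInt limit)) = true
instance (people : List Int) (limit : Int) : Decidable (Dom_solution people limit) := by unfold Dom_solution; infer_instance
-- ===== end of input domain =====

-- B replaces A's O(n^2) list-mutating simulation (del/pop on a sorted list) by an O(n log n)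
-- two-pointer scan over the sorted list; return value only: A empties its argument in place, B does not.
-- A raises IndexError on a one-element list whose person fits a boat twice (excluded by Pre_);
-- on a one-element list with a too-heavy person A returns 1, B returns 2 (stated in D_ below).


-- ===== PORT A =====
-- the for-loop over range(r): state = (current list, rescue); break/return modelled by returning
def aLoop (limit : Int) : Nat → List Int → Int → Int
  | 0, _, rescue => rescue
  | fuel+1, l, rescue =>
    match PySem.List.pyGet? l 0, PySem.List.pyGet? l (-1) with
    | some h, some t =>
        -- if people[0] + people[-1] <= limit: del people[0]
        let l1 := if h + t ≤ limit then l.drop 1 else l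
        -- people.pop()
        match PySem.List.pop? l1 (-1) with
        | some pr =>
            if pr.2.length < 2 then
              if pr.2.length = 0 then (1 : Int) else 2   -- rescue = 1; rescue += 1 on the 1-left branch
            else aLoop limit fuel pr.2 1
        | none => rescue   -- people.pop() on an empty list: IndexError (outside Pre_)
    | _, _ => rescue       -- people[0] on an empty list: IndexError (unreachable: loop entered nonempty)

def solution (people : List Int) (limit : Int) : Int :=
  let s := PySem.List.sorted people (fun x => x) false   -- people.sort()
  aLoop limit s.length s 0                               -- r = len(people); for i in range(r)

-- ===== PORT B =====
-- while i < j: two-pointer scan; fuel = len(a) bounds the loop (j strictly decreases)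
def bLoop (a : List Int) (limit : Int) : Nat → Int → Int → Int × Int
  | 0, i, j => (i, j)
  | fuel+1, i, j =>
    if i < j then
      bLoop a limit fuel
        (if PySem.List.pyGetD a i 0 + PySem.List.pyGetD a j 0 ≤ limit then i + 1 else i)
        (j - 1)
    else (i, j)

def solution_alt (people : List Int) (limit : Int) : Int :=
  let a := PySem.List.sorted people (fun x => x) false
  let p := bLoop a limit a.length 0 ((a.length : Int) - 1)
  if p.2 < 0 then 0 else if p.1 > p.2 then 1 else 2

-- ===== PRECONDITION & SPEC =====
-- Pre_ excludes exactly the one-element lists whose single weight fits twice under the limit: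
-- there A del-s the only element and then pop()s the empty list, raising IndexError.
def Pre_solution (people : List Int) (limit : Int) : Prop :=
  ¬ (people.length = 1 ∧ 2 * people.headI ≤ limit)
instance (people : List Int) (limit : Int) : Decidable (Pre_solution people limit) := by
  unfold Pre_solution; infer_instance

def pvWitness_solution : List Int × Int := ([3, 1, 2], 3)

-- On a one-element list whose person exceeds the limit even alone, A returns 1 as if no one were
-- left unrescued, while B returns 2 (one person still left), consistent with A's own treatment of
-- a leftover person in longer lists — B's value is the intended one.
def D_solution (people : List Int) (limit : Int) : Prop :=
  people.length = 1 ∧ limit < 2 * people.headI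
instance (people : List Int) (limit : Int) : Decidable (D_solution people limit) := by
  unfold D_solution; infer_instance

def Spec_solution (people : List Int) (limit : Int) (out : Int) : Prop :=
  ¬ D_solution people limit → out = solution_alt people limit
instance (people : List Int) (limit : Int) (out : Int) : Decidable (Spec_solution people limit out) := by
  unfold Spec_solution; infer_instance

def pvDiffWitness_solution : List Int × Int := ([7], 5)
def pvDiffWitnessOut_solution : Int × Int := (1, 2)

-- ===== CLAIM (what is proved, stated in full; the proofs are below) =====
def Claim_unchanged_solution : Prop := ∀ (people : List Int) (limit : Int), Dom_solution people limit → Pre_solution people limit → Spec_solution people limit (solution people limit)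
def Claim_changed_solution : Prop := Dom_solution (pvDiffWitness_solution.1) (pvDiffWitness_solution.2) ∧ Pre_solution (pvDiffWitness_solution.1) (pvDiffWitness_solution.2) ∧ D_solution (pvDiffWitness_solution.1) (pvDiffWitness_solution.2) ∧ solution (pvDiffWitness_solution.1) (pvDiffWitness_solution.2) = pvDiffWitnessOut_solution.1 ∧ solution_alt (pvDiffWitness_solution.1) (pvDiffWitness_solution.2) = pvDiffWitnessOut_solution.2 ∧ pvDiffWitnessOut_solution.1 ≠ pvDiffWitnessOut_solution.2
def Claim_exact_solution : Prop := ∀ (people : List Int) (limit : Int), Dom_solution people limit → Pre_solution people limit → D_solution people limit → solution people limit ≠ solution_alt people limit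
-- ===== LEMMAS AND PROOFS =====

lemma bLoop_stop (a : List Int) (limit : Int) (f : Nat) (i j : Int) (h : ¬ i < j) :
    bLoop a limit f i j = (i, j) := by
  cases f <;> simp [bLoop, h]

-- the current list of A's loop is the slice s[i..j] of the sorted list: cons decomposition
lemma seg_cons (s : List Int) (i j : Nat) (hij : i < j) (hj : j < s.length) :
    (s.drop i).take (j + 1 - i) = s[i] :: (s.drop (i + 1)).take (j - i) := by
  rw [List.drop_eq_getElem_cons (by omega)]
  have : j + 1 - i = (j - i) + 1 := by omega
  rw [this, List.take_succ_cons]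

-- append decomposition: the segment ends with s[j]
lemma seg_snoc (s : List Int) (i j : Nat) (_hij : i ≤ j) (hj : j < s.length) :
    (s.drop i).take (j + 1 - i) = (s.drop i).take (j - i) ++ [s[j]] := by
  have h1 : j + 1 - i = (j - i) + 1 := by omega
  rw [h1, List.take_add_one]
  have h2 : (s.drop i)[j - i]? = some s[j] := by
    rw [List.getElem?_drop]
    have : i + (j - i) = j := by omega
    rw [this, List.getElem?_eq_getElem hj]
  simp [h2]

-- main loop correspondence on the sorted list s
lemma loop_eq (s : List Int) (limit : Int) :
    ∀ (fa fb : Nat) (i j : Nat) (rescue : Int), i < j → j < s.length →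
      j - i ≤ fa → j - i ≤ fb →
      aLoop limit fa ((s.drop i).take (j + 1 - i)) rescue
        = (let p := bLoop s limit fb (i : Int) (j : Int);
           if p.2 < 0 then 0 else if p.1 > p.2 then 1 else 2) := by
  intro fa
  induction fa with
  | zero => intro fb i j rescue hij hj hfa hfb; omega
  | succ fa ih =>
    intro fb i j rescue hij hj hfa hfb
    obtain ⟨fb', rfl⟩ : ∃ fb', fb = fb' + 1 := ⟨fb - 1, by omega⟩
    -- evaluate one step of A
    have hGet0 : PySem.List.pyGet? ((s.drop i).take (j + 1 - i)) 0 = some s[i] := by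
      rw [seg_cons s i j hij hj]; simp [pysem]
    have hGetLast : PySem.List.pyGet? ((s.drop i).take (j + 1 - i)) (-1) = some s[j] := by
      rw [seg_snoc s i j (by omega) hj]; simp [pysem]
    -- evaluate one step of B
    have hBi : PySem.List.pyGetD s (i : Int) 0 = s[i] := by
      simp [PySem.List.pyGetD_natCast, List.getD_eq_getElem?_getD,
        List.getElem?_eq_getElem (show i < s.length by omega)]
    have hBj : PySem.List.pyGetD s (j : Int) 0 = s[j] := by
      simp [PySem.List.pyGetD_natCast, List.getD_eq_getElem?_getD, List.getElem?_eq_getElem hj]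
    have hBstep : bLoop s limit (fb' + 1) (i : Int) (j : Int)
        = bLoop s limit fb' (if s[i] + s[j] ≤ limit then (i : Int) + 1 else (i : Int)) ((j : Int) - 1) := by
      simp only [bLoop, hBi, hBj]
      rw [if_pos (by exact_mod_cast hij)]
    rw [hBstep]
    simp only [aLoop, hGet0, hGetLast]
    by_cases hcond : s[i] + s[j] ≤ limit
    · -- del people[0]; pop()
      rw [if_pos hcond, if_pos hcond]
      have hdrop : ((s.drop i).take (j + 1 - i)).drop 1 = (s.drop (i + 1)).take (j + 1 - (i + 1)) := by
        have he : j + 1 - (i + 1) = j - i := by omega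
        rw [seg_cons s i j hij hj, he]
        simp
      have hsnoc : (s.drop (i + 1)).take (j + 1 - (i + 1)) = (s.drop (i + 1)).take (j - (i + 1)) ++ [s[j]] := by
        exact seg_snoc s (i + 1) j (by omega) hj
      rw [hdrop, hsnoc, PySem.List.pop?_last]
      have hlen : ((s.drop (i + 1)).take (j - (i + 1))).length = j - (i + 1) := by
        simp [List.length_take, List.length_drop]; omega
      simp only [hlen]
      by_cases hsmall : j - (i + 1) < 2
      · rw [if_pos hsmall]
        rw [bLoop_stop s limit fb' _ _ (by omega : ¬ ((i : Int) + 1 < (j : Int) - 1))]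
        by_cases hzero : j - (i + 1) = 0
        · rw [if_pos hzero]
          have h1 : ¬ ((j : Int) - 1 < 0) := by omega
          have h2 : (i : Int) + 1 > (j : Int) - 1 := by omega
          simp [h1, h2]
        · rw [if_neg hzero]
          have h1 : ¬ ((j : Int) - 1 < 0) := by omega
          have h2 : ¬ ((i : Int) + 1 > (j : Int) - 1) := by omega
          simp [h1, h2]
      · rw [if_neg hsmall]
        have hrec : (s.drop (i + 1)).take (j - (i + 1)) = (s.drop (i + 1)).take ((j - 1) + 1 - (i + 1)) := by
          congr 1; omega
        rw [hrec]
        have := ih fb' (i + 1) (j - 1) 1 (by omega) (by omega) (by omega) (by omega)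
        rw [this]
        have c1 : ((i + 1 : Nat) : Int) = (i : Int) + 1 := by push_cast; ring
        have c2 : (((j - 1 : Nat)) : Int) = (j : Int) - 1 := by omega
        rw [c1, c2]
    · -- no del; just pop()
      rw [if_neg hcond, if_neg hcond]
      have hsnoc : (s.drop i).take (j + 1 - i) = (s.drop i).take (j - i) ++ [s[j]] :=
        seg_snoc s i j (by omega) hj
      rw [hsnoc, PySem.List.pop?_last]
      have hlen : ((s.drop i).take (j - i)).length = j - i := by
        simp [List.length_take, List.length_drop]; omega
      simp only [hlen]
      by_cases hsmall : j - i < 2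
      · rw [if_pos hsmall]
        rw [bLoop_stop s limit fb' _ _ (by omega : ¬ ((i : Int) < (j : Int) - 1))]
        have hzero : ¬ (j - i = 0) := by omega
        rw [if_neg hzero]
        have h1 : ¬ ((j : Int) - 1 < 0) := by omega
        have h2 : ¬ ((i : Int) > (j : Int) - 1) := by omega
        simp [h1, h2]
      · rw [if_neg hsmall]
        have hrec : (s.drop i).take (j - i) = (s.drop i).take ((j - 1) + 1 - i) := by
          congr 1; omega
        rw [hrec]
        have := ih fb' i (j - 1) 1 (by omega) (by omega) (by omega) (by omega)
        rw [this]
        have c2 : (((j - 1 : Nat)) : Int) = (j : Int) - 1 := by omega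
        rw [c2]

-- top-level correspondence on any sorted list of length ≠ 1
lemma top_eq (limit : Int) (s : List Int) (hne : s.length ≠ 1) :
    aLoop limit s.length s 0
      = (let p := bLoop s limit s.length 0 ((s.length : Int) - 1);
         if p.2 < 0 then 0 else if p.1 > p.2 then 1 else 2) := by
  match hn : s.length with
  | 0 =>
    have hnil : s = [] := List.eq_nil_of_length_eq_zero hn
    rw [hnil]
    simp [aLoop, bLoop]
  | 1 => exact absurd hn hne
  | n + 2 =>
    have hseg : s = (s.drop 0).take ((n + 1) + 1 - 0) := by
      simp [List.take_of_length_le, hn]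
    conv_lhs => rw [hseg]
    have := loop_eq s limit (n + 2) (n + 2) 0 (n + 1) 0 (by omega) (by omega) (by omega) (by omega)
    rw [this]
    have c : (((n + 1 : Nat)) : Int) = ((n + 2 : Nat) : Int) - 1 := by push_cast; ring
    rw [c]
    push_cast
    rfl

-- ===== VERDICT (by name: the statement is the Claim_ definition above) =====
theorem solution_spec : Claim_unchanged_solution := by
  intro people limit _hdom hpre hnD
  have hlen : (PySem.List.sorted people (fun x => x) false).length = people.length :=
    PySem.List.length_sorted people (fun x => x) false
  have hne : people.length ≠ 1 := by
    intro h1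
    obtain ⟨x, hx⟩ := List.length_eq_one_iff.mp h1
    unfold Pre_solution at hpre
    unfold D_solution at hnD
    rw [hx] at hpre hnD
    simp at hpre hnD
    omega
  exact top_eq limit (PySem.List.sorted people (fun x => x) false) (by rw [hlen]; exact hne)

theorem solution_changed : Claim_changed_solution := by
  unfold Claim_changed_solution; decide

theorem solution_tight : Claim_exact_solution := by
  intro people limit _hdom _hpre hD
  obtain ⟨hlen, hlim⟩ := hD
  obtain ⟨x, hx⟩ := List.length_eq_one_iff.mp hlen
  subst hx
  have hlim' : limit < 2 * x := hlim
  have hsort : PySem.List.sorted [x] (fun y => y) false = [x] := by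
    apply PySem.List.sorted_eq_self_of_pairwise; simp
  have hA : solution [x] limit = 1 := by
    unfold solution
    simp only [hsort]
    show aLoop limit 1 [x] 0 = 1
    have hGet0 : PySem.List.pyGet? ([x] : List Int) 0 = some x := by simp [pysem]
    have hGetLast : PySem.List.pyGet? ([x] : List Int) (-1) = some x := by
      simpa using PySem.List.pyGet?_neg_one_append_singleton (xs := ([] : List Int)) (x := x)
    have hpop : PySem.List.pop? ([x] : List Int) (-1) = some (x, ([] : List Int)) := by
      simpa using PySem.List.pop?_last ([] : List Int) x
    simp only [aLoop, hGet0, hGetLast]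
    rw [if_neg (by omega : ¬ (x + x ≤ limit)), hpop]
    simp
  have hB : solution_alt [x] limit = 2 := by
    unfold solution_alt
    simp only [hsort]
    show (let p := bLoop [x] limit 1 0 0; if p.2 < 0 then 0 else if p.1 > p.2 then 1 else 2) = 2
    simp [bLoop]
  rw [hA, hB]
  decide
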